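-- pv_equiv track=rewrite | github.com/sisinflab-swot/evowluator | evowluator/config/evaluation.py | _add_after
-- ===== SOURCE A (Python) =====
-- from typing import Dict, List
--
-- def _add_after(dictionary: Dict, other: Dict, after_key) -> Dict:
--     new_dictionary = {}
--     if after_key in dictionary:
--         for k, v in dictionary.items():
--             new_dictionary[k] = v
--             if k == after_key:
--                 new_dictionary.update(other)
--     else:
--         new_dictionary.update(dictionary)
--         new_dictionary.update(other)
--     return new_dictionary
-- ===== SOURCE B (Python) =====
-- def _add_after(dictionary, other, after_key):
--     items = list(dictionary.items())
--     if after_key in dictionary: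
--         i = list(dictionary).index(after_key)
--         seq = items[:i + 1] + list(other.items()) + items[i + 1:]
--     else:
--         seq = items + list(other.items())
--     return dict(seq)
-- ===== Notes on version B (the rewrite author's own statement) =====
-- stated objective: simpler
-- what changed: A builds the result imperatively, inserting each entry and splicing other in mid-loop; B just splices other's items into the item list after after_key's position and rebuilds a dict from the pair sequence.
import Mathlib
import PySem

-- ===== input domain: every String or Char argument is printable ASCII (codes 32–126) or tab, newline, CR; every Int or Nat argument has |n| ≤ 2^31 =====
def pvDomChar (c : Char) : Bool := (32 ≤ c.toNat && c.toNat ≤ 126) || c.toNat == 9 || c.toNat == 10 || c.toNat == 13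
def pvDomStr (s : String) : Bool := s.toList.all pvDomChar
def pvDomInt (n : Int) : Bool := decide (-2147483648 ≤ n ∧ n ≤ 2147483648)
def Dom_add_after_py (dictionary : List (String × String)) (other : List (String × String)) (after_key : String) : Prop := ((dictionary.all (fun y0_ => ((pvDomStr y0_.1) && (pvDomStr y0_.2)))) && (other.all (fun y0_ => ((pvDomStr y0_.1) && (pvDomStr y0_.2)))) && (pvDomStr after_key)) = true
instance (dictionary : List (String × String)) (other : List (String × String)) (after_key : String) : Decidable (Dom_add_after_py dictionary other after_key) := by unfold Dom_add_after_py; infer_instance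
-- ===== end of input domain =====

-- B rebuilds the dict from a spliced item list instead of A's imperative insert-and-update loop ('simpler').

-- ===== PORT A =====
def add_after_py (dictionary : List (String × String)) (other : List (String × String)) (after_key : String) : List (String × String) :=
  let new0 : PySem.Dict String String := PySem.Dict.empty
  if (PySem.Dict.mk dictionary).contains after_key then
    (dictionary.foldl
      (fun nd kv =>
        let nd' := nd.insert kv.1 kv.2
        if kv.1 == after_key then nd'.update other else nd') new0).items
  else
    ((new0.update dictionary).update other).items

-- ===== PORT B =====
def add_after_py_alt (dictionary : List (String × String)) (other : List (String × String)) (after_key : String) : List (String × String) :=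
  let seq : List (String × String) :=
    match PySem.List.index? (dictionary.map Prod.fst) after_key with
    | some i => dictionary.take (i + 1) ++ other ++ dictionary.drop (i + 1)
    | none => dictionary ++ other
  (PySem.Dict.ofList seq).items

-- ===== PRECONDITION & SPEC =====
-- Pre_ excludes association lists with duplicate keys in `dictionary`: they do not represent a Python
-- dict (Python collapses them before the call), and A's loop would re-apply `other` after every
-- duplicate of after_key while B splices it once.
def Pre_add_after_py (dictionary : List (String × String)) (other : List (String × String)) (after_key : String) : Prop :=
  (dictionary.map Prod.fst).Nodup
instance (dictionary : List (String × String)) (other : List (String × String)) (after_key : String) : Decidable (Pre_add_after_py dictionary other after_key) := by unfold Pre_add_after_py; infer_instance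

def pvWitness_add_after_py : (List (String × String)) × (List (String × String)) × String :=
  ([("a", "1"), ("b", "2")], [("c", "3")], "a")

def Spec_add_after_py (dictionary : List (String × String)) (other : List (String × String)) (after_key : String) (out : List (String × String)) : Prop := out = add_after_py_alt dictionary other after_key
instance (dictionary : List (String × String)) (other : List (String × String)) (after_key : String) (out : List (String × String)) : Decidable (Spec_add_after_py dictionary other after_key out) := by unfold Spec_add_after_py; infer_instance

-- ===== CLAIM (what is proved, stated in full; the proofs are below) =====
def Claim_equal_add_after_py : Prop := ∀ (dictionary : List (String × String)) (other : List (String × String)) (after_key : String), Dom_add_after_py dictionary other after_key → Pre_add_after_py dictionary other after_key → Spec_add_after_py dictionary other after_key (add_after_py dictionary other after_key)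

-- ===== LEMMAS AND PROOFS =====

-- the per-entry contribution of A's loop body, as a list of pairs
def pvStep (other : List (String × String)) (after_key : String) (kv : String × String) : List (String × String) :=
  kv :: (if kv.1 == after_key then other else [])

theorem update_append (d : PySem.Dict String String) (l1 l2 : List (String × String)) :
    d.update (l1 ++ l2) = (d.update l1).update l2 := by
  simp [PySem.Dict.update, List.foldl_append]

theorem fold_eq_update_flatMap (other : List (String × String)) (after_key : String)
    (l : List (String × String)) (d : PySem.Dict String String) :
    l.foldl (fun nd kv =>
        let nd' := nd.insert kv.1 kv.2
        if kv.1 == after_key then nd'.update other else nd') d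
      = d.update (l.flatMap (pvStep other after_key)) := by
  induction l generalizing d with
  | nil => simp [PySem.Dict.update]
  | cons kv t ih =>
      rw [List.foldl_cons, ih, List.flatMap_cons, update_append]
      congr 1
      simp only [pvStep]
      split <;> simp [PySem.Dict.update]

theorem flatMap_eq_self (other : List (String × String)) (after_key : String)
    (l : List (String × String)) (h : after_key ∉ l.map Prod.fst) :
    l.flatMap (pvStep other after_key) = l := by
  induction l with
  | nil => simp
  | cons kv t ih =>
      simp only [List.map_cons, List.mem_cons, not_or] at h
      simp [pvStep, ih h.2, beq_iff_eq, Ne.symm h.1]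

theorem flatMap_splice (other : List (String × String)) (after_key : String)
    (l : List (String × String)) (hnd : (l.map Prod.fst).Nodup) (i : Nat)
    (hi : PySem.List.index? (l.map Prod.fst) after_key = some i) :
    l.flatMap (pvStep other after_key) = l.take (i + 1) ++ other ++ l.drop (i + 1) := by
  induction l generalizing i with
  | nil => simp [PySem.List.index?] at hi
  | cons kv t ih =>
      simp only [List.map_cons, List.nodup_cons] at hnd
      by_cases hk : kv.1 = after_key
      · rw [List.map_cons, hk, PySem.List.index?_cons_self] at hi
        injection hi with h0
        subst h0
        have ht : t.flatMap (pvStep other after_key) = t :=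
          flatMap_eq_self other after_key t (hk ▸ hnd.1)
        simp [pvStep, hk, ht]
      · rw [List.map_cons, PySem.List.index?_cons_of_ne _ hk] at hi
        obtain ⟨j, hj, hji⟩ := Option.map_eq_some_iff.mp hi
        subst hji
        simp [pvStep, hk, ih hnd.2 j hj, List.append_assoc]

theorem contains_mk_iff (l : List (String × String)) (k : String) :
    (PySem.Dict.mk l).contains k = true ↔ k ∈ l.map Prod.fst := by
  simp [PySem.Dict.contains, List.any_eq_true, beq_iff_eq, List.mem_map]

-- ===== VERDICT (by name: the statement is the Claim_ definition above) =====
theorem add_after_py_spec : Claim_equal_add_after_py := by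
  intro dictionary other after_key _ hpre
  unfold Spec_add_after_py add_after_py add_after_py_alt
  by_cases hc : (PySem.Dict.mk dictionary).contains after_key = true
  · have hmem : after_key ∈ dictionary.map Prod.fst := (contains_mk_iff _ _).mp hc
    obtain ⟨i, hi⟩ := Option.isSome_iff_exists.mp
      ((PySem.List.index?_isSome_iff _ _).mpr hmem)
    simp only [hc, if_true, hi]
    rw [fold_eq_update_flatMap, flatMap_splice other after_key dictionary hpre i hi]
    rfl
  · have hnm : after_key ∉ dictionary.map Prod.fst := fun h => hc ((contains_mk_iff _ _).mpr h)
    have hi : PySem.List.index? (dictionary.map Prod.fst) after_key = none :=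
      (PySem.List.index?_eq_none_iff _ _).mpr hnm
    simp only [hc, hi]
    rw [← update_append]
    rfl
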